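-- pv_equiv track=rewrite | github.com/Hi-Simon/NRMS_Pytorch_MIND | light_module.py | group_labels
-- ===== SOURCE A (Python) =====
-- def group_labels(labels, preds, group_keys):
--     """Devide labels and preds into several group according to values in group keys.
--
--     Args:
--         labels (list): ground truth label list.
--         preds (list): prediction score list.
--         group_keys (list): group key list.
--
--     Returns:
--         list, list, list:
--         - Keys after group.
--         - Labels after group.
--         - Preds after group.
--
--     """
--
--     all_keys = list(set(group_keys))
--     all_keys.sort()
--     group_labels = {k: [] for k in all_keys}
--     group_preds = {k: [] for k in all_keys}
--
--     for l, p, k in zip(labels, preds, group_keys):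
--         group_labels[k].append(l)
--         group_preds[k].append(p)
--
--     all_labels = []
--     all_preds = []
--     for k in all_keys:
--         all_labels.append(group_labels[k])
--         all_preds.append(group_preds[k])
--
--     return all_keys, all_labels, all_preds
-- ===== SOURCE B (Python) =====
-- def group_labels(labels, preds, group_keys):
--     """Group labels and preds by sorted group keys via sort-and-scan instead of dict bucketing."""
--     triples = sorted(zip(group_keys, labels, preds), key=lambda t: t[0])
--     all_keys = sorted(set(group_keys))
--     all_labels = []
--     all_preds = []
--     i, n = 0, len(triples)
--     for k in all_keys:
--         j = i
--         while j < n and triples[j][0] == k: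
--             j += 1
--         all_labels.append([t[1] for t in triples[i:j]])
--         all_preds.append([t[2] for t in triples[i:j]])
--         i = j
--     return all_keys, all_labels, all_preds
-- ===== Notes on version B (the rewrite author's own statement) =====
-- stated objective: alternative
-- what changed: Replaces A's two dict-of-buckets built over a zip loop with a stable sort of the zipped (key, label, pred) triples followed by a single linear scan over the sorted distinct keys that slices out each key's run.
import Mathlib
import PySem

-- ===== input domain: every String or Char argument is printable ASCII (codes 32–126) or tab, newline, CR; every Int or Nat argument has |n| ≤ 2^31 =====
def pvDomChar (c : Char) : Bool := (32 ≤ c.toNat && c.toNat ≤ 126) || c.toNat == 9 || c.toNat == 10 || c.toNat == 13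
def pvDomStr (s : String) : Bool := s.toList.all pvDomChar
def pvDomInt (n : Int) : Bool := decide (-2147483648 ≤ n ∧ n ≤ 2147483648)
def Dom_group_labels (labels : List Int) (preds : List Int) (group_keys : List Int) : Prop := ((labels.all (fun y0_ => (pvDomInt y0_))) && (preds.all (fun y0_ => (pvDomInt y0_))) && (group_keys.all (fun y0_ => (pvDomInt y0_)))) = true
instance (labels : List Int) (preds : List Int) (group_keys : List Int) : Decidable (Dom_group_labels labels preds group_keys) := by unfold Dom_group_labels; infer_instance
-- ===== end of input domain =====

-- B replaces A's dict-bucketing with a stable sort of the zipped triples followed by one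
-- linear scan over the sorted keys (objective: alternative algorithm, same result).

-- ===== PORT A =====
def group_labels (labels : List Int) (preds : List Int) (group_keys : List Int) : List Int × List (List Int) × List (List Int) :=
  -- all_keys = list(set(group_keys)); all_keys.sort()
  let all_keys := PySem.List.sorted (PySem.Set.ofList group_keys) (fun k => k)
  -- group_labels = {k: [] for k in all_keys}; group_preds = {k: [] for k in all_keys}
  let gl : PySem.Dict Int (List Int) := all_keys.foldl (fun d k => d.insert k []) PySem.Dict.empty
  let gp : PySem.Dict Int (List Int) := all_keys.foldl (fun d k => d.insert k []) PySem.Dict.empty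
  -- for l, p, k in zip(labels, preds, group_keys): group_labels[k].append(l); group_preds[k].append(p)
  -- d[k].append(v): k is always a key of the dict (built from set(group_keys)), so the
  -- KeyError branch of Python's d[k] is unreachable; ported as modify with default [].
  let st := (labels.zip (preds.zip group_keys)).foldl
    (fun (s : PySem.Dict Int (List Int) × PySem.Dict Int (List Int)) t =>
      (s.1.modify t.2.2 [] (fun xs => xs ++ [t.1]), s.2.modify t.2.2 [] (fun xs => xs ++ [t.2.1])))
    (gl, gp)
  -- for k in all_keys: all_labels.append(group_labels[k]); all_preds.append(group_preds[k])
  let all_labels := all_keys.foldl (fun acc k => acc ++ [st.1.getD k []]) []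
  let all_preds := all_keys.foldl (fun acc k => acc ++ [st.2.getD k []]) []
  (all_keys, all_labels, all_preds)

-- ===== PORT B =====
-- the scan: for each key k (in sorted order) take the run of triples with key k
def bScan : List Int → List (Int × Int × Int) → List (List Int) × List (List Int)
  | [], _ => ([], [])
  | k :: ks, ts =>
    let run := ts.takeWhile (fun t => t.1 == k)
    let rest := ts.dropWhile (fun t => t.1 == k)
    let r := bScan ks rest
    (run.map (fun t => t.2.1) :: r.1, run.map (fun t => t.2.2) :: r.2)

def group_labels_alt (labels : List Int) (preds : List Int) (group_keys : List Int) : List Int × List (List Int) × List (List Int) :=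
  -- triples = sorted(zip(group_keys, labels, preds), key=lambda t: t[0])  (stable)
  let triples := PySem.List.sorted (group_keys.zip (labels.zip preds)) (fun t => t.1)
  -- all_keys = sorted(set(group_keys))
  let all_keys := PySem.List.sorted (PySem.Set.ofList group_keys) (fun k => k)
  let r := bScan all_keys triples
  (all_keys, r.1, r.2)

-- ===== PRECONDITION & SPEC =====
def Spec_group_labels (labels : List Int) (preds : List Int) (group_keys : List Int) (out : List Int × List (List Int) × List (List Int)) : Prop := out = group_labels_alt labels preds group_keys
instance (labels : List Int) (preds : List Int) (group_keys : List Int) (out : List Int × List (List Int) × List (List Int)) : Decidable (Spec_group_labels labels preds group_keys out) := by unfold Spec_group_labels; infer_instance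

-- ===== CLAIM (what is proved, stated in full; the proofs are below) =====
def Claim_equal_group_labels : Prop := ∀ (labels : List Int) (preds : List Int) (group_keys : List Int), Dom_group_labels labels preds group_keys → Spec_group_labels labels preds group_keys (group_labels labels preds group_keys)

-- ===== LEMMAS AND PROOFS =====

-- a fold inserting [] at every key leaves every getD _ [] equal to []
theorem getD_fold_insert_nil (ks : List Int) (d : PySem.Dict Int (List Int))
    (h : ∀ c : Int, d.getD c [] = []) (c : Int) :
    (ks.foldl (fun d k => d.insert k ([] : List Int)) d).getD c [] = [] := by
  induction ks generalizing d with
  | nil => simpa using h c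
  | cons k ks ih =>
    simp only [List.foldl_cons]
    exact ih _ (fun c => by rw [PySem.Dict.getD_insert]; split <;> simp [h])

-- the two zip shapes (A zips (l,(p,k)), B zips (k,(l,p))) are images of each other
theorem zip3_swap (ls ps ks : List Int) :
    (ls.zip (ps.zip ks)).map (fun t => (t.2.2, (t.1, t.2.1))) = ks.zip (ls.zip ps) := by
  induction ls generalizing ps ks with
  | nil => cases ps <;> cases ks <;> simp
  | cons l ls ih => cases ps <;> cases ks <;> simp [ih]

-- inserting x into a key-sorted list puts it after all equal-key elements (stability)
theorem filter_insertBy {α : Type} (key : α → Int) (k : Int) (x : α) (ys : List α)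
    (hs : ys.Pairwise (fun a b => key a ≤ key b)) :
    (PySem.List.insertBy (fun a b => decide (key a < key b)) x ys).filter (fun y => key y == k)
      = ys.filter (fun y => key y == k) ++ (if key x == k then [x] else []) := by
  induction ys with
  | nil => simp [PySem.List.insertBy]; split <;> simp_all
  | cons y ys ih =>
    rw [List.pairwise_cons] at hs
    simp only [PySem.List.insertBy]
    split
    · rename_i hlt
      simp only [decide_eq_true_eq] at hlt
      by_cases hxk : (key x == k) = true
      · have hnil : (y :: ys).filter (fun y => key y == k) = [] := by
          rw [List.filter_eq_nil_iff]
          intro z hz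
          have hyz : key y ≤ key z := by
            rcases List.mem_cons.mp hz with h1 | h1
            · exact le_of_eq (congrArg key h1.symm)
            · exact hs.1 z h1
          have hxk' : key x = k := by simpa using hxk
          simp only [beq_iff_eq]; omega
        simp [hxk, hnil]
      · simp [List.filter_cons, hxk]
    · rw [List.filter_cons, List.filter_cons, ih hs.2]
      split <;> simp

-- stability of PySem's sort: filtering one key class commutes with sorting
theorem filter_sorted {α : Type} (key : α → Int) (xs : List α) (k : Int) :
    (PySem.List.sorted xs key).filter (fun x => key x == k) = xs.filter (fun x => key x == k) := by
  induction xs using List.reverseRecOn with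
  | nil => simp [PySem.List.sorted_eq_foldl_insertBy]
  | append_singleton ys x ih =>
    have hfold := PySem.List.sorted_eq_foldl_insertBy (ys ++ [x]) key
    rw [List.foldl_append, ← PySem.List.sorted_eq_foldl_insertBy] at hfold
    rw [hfold, List.foldl_cons, List.foldl_nil,
      filter_insertBy key k x _ (PySem.List.sorted_pairwise ys key), ih, List.filter_append]
    simp [List.filter_cons]

-- on a key-sorted list whose keys are all ≥ k, the k-run is the whole k-class
theorem takeWhile_eq_filter (k : Int) (ts : List (Int × Int × Int))
    (hs : ts.Pairwise (fun a b => a.1 ≤ b.1)) (hge : ∀ t ∈ ts, k ≤ t.1) :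
    ts.takeWhile (fun t => t.1 == k) = ts.filter (fun t => t.1 == k) := by
  induction ts with
  | nil => simp
  | cons h tl ih =>
    rw [List.pairwise_cons] at hs
    by_cases hk : (h.1 == k) = true
    · simp only [List.takeWhile_cons, List.filter_cons, hk, if_true]
      rw [ih hs.2 (fun t ht => hge t (List.mem_cons_of_mem _ ht))]
    · have hgt : k < h.1 := by
        have h1 : k ≤ h.1 := hge h List.mem_cons_self
        simp only [beq_iff_eq] at hk; omega
      have hnil : List.filter (fun t => t.1 == k) tl = [] := by
        rw [List.filter_eq_nil_iff]
        intro t ht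
        have : h.1 ≤ t.1 := hs.1 t ht
        simp only [beq_iff_eq]; omega
      simp [hk, hnil]

-- everything surviving the k-run has key strictly greater than k
theorem dropWhile_keys_gt (k : Int) (ts : List (Int × Int × Int))
    (hs : ts.Pairwise (fun a b => a.1 ≤ b.1)) (hge : ∀ t ∈ ts, k ≤ t.1) :
    ∀ t ∈ ts.dropWhile (fun t => t.1 == k), k < t.1 := by
  induction ts with
  | nil => simp
  | cons h tl ih =>
    rw [List.pairwise_cons] at hs
    by_cases hk : (h.1 == k) = true
    · simp [hk]
      intro a b c hm
      exact ih hs.2 (fun t' ht' => hge t' (List.mem_cons_of_mem _ ht')) (a, b, c) hm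
    · simp only [List.dropWhile_cons, hk, Bool.false_eq_true, if_false]
      intro t ht
      have hgt : k < h.1 := by
        have h1 : k ≤ h.1 := hge h List.mem_cons_self
        simp only [beq_iff_eq] at hk; omega
      rcases List.mem_cons.mp ht with h1 | h1
      · exact h1 ▸ hgt
      · have : h.1 ≤ t.1 := hs.1 t h1
        omega

-- the scan over sorted distinct keys of a key-sorted list yields the filter classes
theorem bScan_spec (ks : List Int) (ts : List (Int × Int × Int))
    (hks : ks.Pairwise (· < ·)) (hts : ts.Pairwise (fun a b => a.1 ≤ b.1))
    (hmem : ∀ t ∈ ts, t.1 ∈ ks) :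
    bScan ks ts = (ks.map (fun k => (ts.filter (fun t => t.1 == k)).map (fun t => t.2.1)),
                   ks.map (fun k => (ts.filter (fun t => t.1 == k)).map (fun t => t.2.2))) := by
  induction ks generalizing ts with
  | nil =>
    have hnil : ts = [] := by
      cases ts with
      | nil => rfl
      | cons t tl => exact absurd (hmem t List.mem_cons_self) (by simp)
    simp [bScan, hnil]
  | cons k ks ih =>
    rw [List.pairwise_cons] at hks
    have hge : ∀ t ∈ ts, k ≤ t.1 := by
      intro t ht
      rcases List.mem_cons.mp (hmem t ht) with h1 | h1
      · exact le_of_eq h1.symm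
      · exact le_of_lt (hks.1 t.1 h1)
    have hrest_gt := dropWhile_keys_gt k ts hts hge
    have hrest_sorted : (ts.dropWhile (fun t => t.1 == k)).Pairwise (fun a b => a.1 ≤ b.1) :=
      List.Pairwise.sublist (List.dropWhile_sublist _) hts
    have hrest_mem : ∀ t ∈ ts.dropWhile (fun t => t.1 == k), t.1 ∈ ks := by
      intro t ht
      rcases List.mem_cons.mp (hmem t ((List.dropWhile_sublist _).mem ht)) with h1 | h1
      · exact absurd (hrest_gt t ht) (by omega)
      · exact h1
    have hfilters : ∀ k' ∈ ks, (ts.dropWhile (fun t => t.1 == k)).filter (fun t => t.1 == k')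
        = ts.filter (fun t => t.1 == k') := by
      intro k' hk'
      conv_rhs => rw [← List.takeWhile_append_dropWhile (p := fun t => t.1 == k) (l := ts)]
      rw [List.filter_append]
      have htk : (ts.takeWhile (fun t => t.1 == k)).filter (fun t => t.1 == k') = [] := by
        rw [List.filter_eq_nil_iff]
        intro t ht
        have h1 : t.1 = k := by simpa using List.mem_takeWhile_imp ht
        have h2 : k < k' := hks.1 k' hk'
        simp only [beq_iff_eq]; omega
      rw [htk, List.nil_append]
    have hL : ks.map (fun k' => ((ts.dropWhile (fun t => t.1 == k)).filter (fun t => t.1 == k')).map (fun t => t.2.1))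
        = ks.map (fun k' => (ts.filter (fun t => t.1 == k')).map (fun t => t.2.1)) :=
      List.map_congr_left (fun k' hk' => by rw [hfilters k' hk'])
    have hP : ks.map (fun k' => ((ts.dropWhile (fun t => t.1 == k)).filter (fun t => t.1 == k')).map (fun t => t.2.2))
        = ks.map (fun k' => (ts.filter (fun t => t.1 == k')).map (fun t => t.2.2)) :=
      List.map_congr_left (fun k' hk' => by rw [hfilters k' hk'])
    simp only [bScan, ih _ hks.2 hrest_sorted hrest_mem, hL, hP,
      takeWhile_eq_filter k ts hts hge, List.map_cons]

-- ===== VERDICT (by name: the statement is the Claim_ definition above) =====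
theorem group_labels_spec : Claim_equal_group_labels := by
  intro labels preds group_keys _
  unfold Spec_group_labels group_labels group_labels_alt
  dsimp only
  set all_keys := PySem.List.sorted (PySem.Set.ofList group_keys) (fun k => k) with hak
  set zipB := group_keys.zip (labels.zip preds) with hzB
  set zipA := labels.zip (preds.zip group_keys) with hzA
  set d0 := all_keys.foldl (fun d k => d.insert k ([] : List Int)) PySem.Dict.empty with hd0
  -- split the simultaneous two-dict fold of A into two folds
  have hsplit : zipA.foldl
      (fun (s : PySem.Dict Int (List Int) × PySem.Dict Int (List Int)) t =>
        (s.1.modify t.2.2 [] (fun xs => xs ++ [t.1]), s.2.modify t.2.2 [] (fun xs => xs ++ [t.2.1])))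
      (d0, d0)
      = (zipA.foldl (fun d t => d.modify t.2.2 [] (fun xs => xs ++ [t.1])) d0,
         zipA.foldl (fun d t => d.modify t.2.2 [] (fun xs => xs ++ [t.2.1])) d0) :=
    PySem.List.foldl_prod_mk
      (fun (d : PySem.Dict Int (List Int)) (t : Int × Int × Int) => d.modify t.2.2 [] (fun xs => xs ++ [t.1]))
      (fun (d : PySem.Dict Int (List Int)) (t : Int × Int × Int) => d.modify t.2.2 [] (fun xs => xs ++ [t.2.1]))
      zipA d0 d0
  -- A's bucket for key k, as the k-filter class of zipB
  have hA : ∀ (proj : Int × Int × Int → Int) (sel : Int × (Int × Int) → Int),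
      (∀ t : Int × Int × Int, proj t = sel (t.2.2, (t.1, t.2.1))) →
      ∀ k : Int,
      (zipA.foldl (fun d t => d.modify t.2.2 [] (fun xs => xs ++ [proj t])) d0).getD k []
        = (zipB.filter (fun t => t.1 == k)).map sel := by
    intro proj sel hps k
    have hmap : zipA.foldl (fun d t => d.modify t.2.2 [] (fun xs => xs ++ [proj t])) d0
        = (zipA.map (fun t => (t.2.2, proj t))).foldl
            (fun d p => d.modify p.1 [] (fun xs => xs ++ [p.2])) d0 := by
      rw [List.foldl_map]
    rw [hmap, PySem.Dict.getD_foldl_modify_append,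
      getD_fold_insert_nil all_keys PySem.Dict.empty
        (fun c => by simp [PySem.Dict.empty, PySem.Dict.getD, PySem.Dict.get?]) k,
      List.nil_append]
    have hfactor : zipA.map (fun t => (t.2.2, proj t)) = zipB.map (fun u => (u.1, sel u)) := by
      rw [hzB, hzA, ← zip3_swap labels preds group_keys, List.map_map]
      exact List.map_congr_left (fun t _ => by simp [Function.comp, hps t])
    rw [hfactor, List.filter_map, List.map_map]
    rfl
  -- B's scan yields the same filter classes (of the sorted list), and sorting is stable
  have hBmem : ∀ t ∈ PySem.List.sorted zipB (fun t => t.1), t.1 ∈ all_keys := by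
    intro t ht
    rw [PySem.List.mem_sorted] at ht
    obtain ⟨a, b⟩ := t
    rw [hak, PySem.List.mem_sorted, PySem.Set.mem_ofList]
    exact (List.of_mem_zip ht).1
  have hB := bScan_spec all_keys (PySem.List.sorted zipB (fun t => t.1))
    (by rw [hak]; exact PySem.List.sorted_ofList_pairwise_lt group_keys)
    (PySem.List.sorted_pairwise zipB (fun t => t.1)) hBmem
  have hstab : ∀ k : Int, (PySem.List.sorted zipB (fun t => t.1)).filter (fun t => t.1 == k)
      = zipB.filter (fun t => t.1 == k) := fun k => filter_sorted (fun t => t.1) zipB k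
  rw [hsplit, hB]
  simp only [PySem.List.foldl_append_singleton_eq_map, List.nil_append, Prod.mk.injEq]
  refine ⟨by trivial, ?_, ?_⟩
  · exact List.map_congr_left (fun k _ =>
      (hA (fun t => t.1) (fun u => u.2.1) (fun t => rfl) k).trans
        (congrArg (List.map (fun t => t.2.1)) (hstab k)).symm)
  · exact List.map_congr_left (fun k _ =>
      (hA (fun t => t.2.1) (fun u => u.2.2) (fun t => rfl) k).trans
        (congrArg (List.map (fun t => t.2.2)) (hstab k)).symm)
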